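-- pv_equiv track=rewrite | github.com/denfry/VUZ | people/vitos/subjects/basic-information-processing-algorithms/lab-03/lab03_variant2.py | recursive_format_words
-- ===== SOURCE A (Python) =====
-- def recursive_format_words(words: list[str], index: int = 0) -> str:
--     if index >= len(words):
--         return ""
--
--     current = f"{index}: {words[index]}"
--     rest = recursive_format_words(words, index + 1)
--     if rest:
--         return current + "\n" + rest
--     return current
-- ===== SOURCE B (Python) =====
-- def recursive_format_words(words: list[str], index: int = 0) -> str:
--     return "\n".join(f"{i}: {words[i]}" for i in range(index, len(words)))
-- ===== Notes on version B (the rewrite author's own statement) =====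
-- stated objective: idiomatic
-- what changed: Replaces the recursion with repeated string concatenation by a single join over absolute indices from range(index, len(words)).
import Mathlib
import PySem

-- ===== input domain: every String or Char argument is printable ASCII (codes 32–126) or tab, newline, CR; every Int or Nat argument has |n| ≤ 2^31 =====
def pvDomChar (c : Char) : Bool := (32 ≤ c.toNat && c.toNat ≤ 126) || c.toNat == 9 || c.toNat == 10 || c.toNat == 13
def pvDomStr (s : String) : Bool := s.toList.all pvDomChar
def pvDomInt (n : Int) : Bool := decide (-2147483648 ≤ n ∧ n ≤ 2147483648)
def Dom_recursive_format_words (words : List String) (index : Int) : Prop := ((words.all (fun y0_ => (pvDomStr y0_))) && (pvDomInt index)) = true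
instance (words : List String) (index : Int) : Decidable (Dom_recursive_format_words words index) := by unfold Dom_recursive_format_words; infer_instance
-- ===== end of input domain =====

-- B replaces A's recursion (with its repeated string concatenation) by one join over
-- absolute indices from range(index, len(words)): same output, idiomatic single pass.

-- ===== PORT A =====
def recursive_format_words (words : List String) (index : Int) : String :=
  if _h : index ≥ (PySem.List.len words) then ""
  else
    -- words[index]: pyGetD is exact under Pre_ (in range); out of range Python raises IndexError
    let current := PySem.Int.toStr index ++ ": " ++ PySem.List.pyGetD words index ""
    let rest := recursive_format_words words (index + 1)
    if rest ≠ "" then current ++ "\n" ++ rest else current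
termination_by ((words.length : Int) - index).toNat
decreasing_by
  simp only [PySem.List.len_eq] at _h
  omega

-- ===== PORT B =====
def recursive_format_words_alt (words : List String) (index : Int) : String :=
  PySem.Str.join "\n"
    ((PySem.List.pyRange index (PySem.List.len words) 1).map
      (fun i => PySem.Int.toStr i ++ ": " ++ PySem.List.pyGetD words i ""))

-- ===== PRECONDITION & SPEC =====
-- Pre_ excludes exactly the inputs where Python A raises IndexError (index below -len(words));
-- B raises there as well.
def Pre_recursive_format_words (words : List String) (index : Int) : Prop :=
  -(words.length : Int) ≤ index
instance (words : List String) (index : Int) : Decidable (Pre_recursive_format_words words index) := by unfold Pre_recursive_format_words; infer_instance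
def pvWitness_recursive_format_words : List String × Int := (["alpha", "beta"], 0)

def Spec_recursive_format_words (words : List String) (index : Int) (out : String) : Prop := out = recursive_format_words_alt words index
instance (words : List String) (index : Int) (out : String) : Decidable (Spec_recursive_format_words words index out) := by unfold Spec_recursive_format_words; infer_instance

-- ===== CLAIM (what is proved, stated in full; the proofs are below) =====
def Claim_equal_recursive_format_words : Prop := ∀ (words : List String) (index : Int), Dom_recursive_format_words words index → Pre_recursive_format_words words index → Spec_recursive_format_words words index (recursive_format_words words index)

-- ===== LEMMAS AND PROOFS =====

theorem str_join_singleton (sep p : String) : PySem.Str.join sep [p] = p := by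
  apply String.toList_inj.mp
  simp [PySem.Str.toList_join, PySem.Chars.join_singleton]

theorem str_join_cons_cons (sep p q : String) (rest : List String) :
    PySem.Str.join sep (p :: q :: rest) = p ++ sep ++ PySem.Str.join sep (q :: rest) := by
  apply String.toList_inj.mp
  simp [PySem.Str.toList_join, String.toList_append, PySem.Chars.join_cons_cons]

theorem line_ne_empty (words : List String) (i : Int) :
    PySem.Int.toStr i ++ ": " ++ PySem.List.pyGetD words i "" ≠ "" := by
  intro h
  have := congrArg String.toList h
  simp [String.toList_append] at this

theorem join_lines_cons_ne_empty (words : List String) (i : Int) (rest : List String) :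
    PySem.Str.join "\n" ((PySem.Int.toStr i ++ ": " ++ PySem.List.pyGetD words i "") :: rest) ≠ "" := by
  cases rest with
  | nil => rw [str_join_singleton]; exact line_ne_empty words i
  | cons q l =>
    rw [str_join_cons_cons]
    intro h
    have := congrArg String.toList h
    simp [String.toList_append] at this

theorem main_eq (n : Nat) : ∀ (words : List String) (index : Int),
    ((words.length : Int) - index).toNat = n →
    recursive_format_words words index = recursive_format_words_alt words index := by
  induction n with
  | zero =>
    intro words index h
    have hge : index ≥ (words.length : Int) := by omega
    rw [recursive_format_words, recursive_format_words_alt]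
    simp [PySem.List.len_eq, hge, PySem.List.pyRange_one_eq_nil hge]
    rfl
  | succ n ih =>
    intro words index h
    have hlt : index < (words.length : Int) := by omega
    rw [recursive_format_words, recursive_format_words_alt]
    simp only [PySem.List.len_eq]
    rw [dif_neg (by omega)]
    have hrest : recursive_format_words words (index + 1) = recursive_format_words_alt words (index + 1) :=
      ih words (index + 1) (by omega)
    rw [PySem.List.pyRange_one_cons hlt, List.map_cons]
    by_cases hend : index + 1 < (words.length : Int)
    · -- more lines follow
      have hne : recursive_format_words words (index + 1) ≠ "" := by
        rw [hrest, recursive_format_words_alt]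
        simp only [PySem.List.len_eq]
        rw [PySem.List.pyRange_one_cons hend, List.map_cons]
        exact join_lines_cons_ne_empty words (index + 1) _
      rw [if_pos hne, hrest, recursive_format_words_alt]
      simp only [PySem.List.len_eq]
      rw [PySem.List.pyRange_one_cons hend, List.map_cons, str_join_cons_cons]
    · -- last line
      have hnil : PySem.List.pyRange (index + 1) (words.length : Int) 1 = [] :=
        PySem.List.pyRange_one_eq_nil (by omega)
      have hrest0 : recursive_format_words words (index + 1) = "" := by
        rw [hrest, recursive_format_words_alt]
        simp only [PySem.List.len_eq]
        rw [hnil]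
        rfl
      rw [if_neg (by simp [hrest0]), hnil, List.map_nil, str_join_singleton]

-- ===== VERDICT (by name: the statement is the Claim_ definition above) =====
theorem recursive_format_words_spec : Claim_equal_recursive_format_words := by
  intro words index _hdom _hpre
  unfold Spec_recursive_format_words
  exact main_eq ((words.length : Int) - index).toNat words index rfl
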